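-- pv_equiv track=rewrite | github.com/mohammadfaiizan/ProjectI | DSA/Problem/Dynamic Programming/13_Advanced_Patterns/Matrix_Exponentiation_DP.py | advanced_state_transitions_matrix
-- ===== SOURCE A (Python) =====
-- def matrix_multiply(A, B, mod=None):
--     """
--     MATRIX MULTIPLICATION:
--     =====================
--     Multiply two matrices with optional modulo.
--
--     Time Complexity: O(n^3) - where n is matrix dimension
--     Space Complexity: O(n^2) - result matrix
--     """
--     rows_A, cols_A = len(A), len(A[0])
--     rows_B, cols_B = len(B), len(B[0])
--
--     if cols_A != rows_B:
--         raise ValueError("Matrix dimensions don't match for multiplication")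
--
--     result = [[0] * cols_B for _ in range(rows_A)]
--
--     for i in range(rows_A):
--         for j in range(cols_B):
--             for k in range(cols_A):
--                 result[i][j] += A[i][k] * B[k][j]
--                 if mod:
--                     result[i][j] %= mod
--
--     return result
--
-- def matrix_power(matrix, power, mod=None):
--     """
--     MATRIX EXPONENTIATION:
--     =====================
--     Compute matrix^power using fast exponentiation.
--
--     Time Complexity: O(n^3 * log(power)) - where n is matrix dimension
--     Space Complexity: O(n^2) - matrix storage
--     """
--     n = len(matrix)
--
--     # Initialize result as identity matrix
--     result = [[0] * n for _ in range(n)]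
--     for i in range(n):
--         result[i][i] = 1
--
--     base = [row[:] for row in matrix]  # Copy matrix
--
--     while power > 0:
--         if power % 2 == 1:
--             result = matrix_multiply(result, base, mod)
--         base = matrix_multiply(base, base, mod)
--         power //= 2
--
--     return result
--
-- def advanced_state_transitions_matrix(transition_matrix, initial_state, steps, mod=None):
--     """
--     ADVANCED STATE TRANSITIONS:
--     ===========================
--     Model complex state transitions using matrix exponentiation.
--
--     Applications:
--     - Markov chains
--     - Finite state automata
--     - Complex DP state transitions
--
--     Time Complexity: O(s^3 * log steps) - where s is number of states
--     Space Complexity: O(s^2) - transition matrix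
--     """
--     # Compute transition_matrix^steps
--     result_matrix = matrix_power(transition_matrix, steps, mod)
--
--     # Apply to initial state
--     final_state = [0] * len(initial_state)
--
--     for i in range(len(initial_state)):
--         for j in range(len(initial_state)):
--             final_state[i] += result_matrix[i][j] * initial_state[j]
--             if mod:
--                 final_state[i] %= mod
--
--     return final_state
-- ===== SOURCE B (Python) =====
-- def _mat_vec(base, vec, n, mod):
--     # one matrix-vector product with A's running-mod pattern
--     out = [0] * n
--     for i in range(n):
--         acc = 0
--         for j in range(n):
--             acc += base[i][j] * vec[j]
--             if mod:
--                 acc %= mod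
--         out[i] = acc
--     return out
--
--
-- def _mat_sq(base, mod):
--     # square an s x s matrix with the running-mod pattern
--     m = len(base)
--     out = [[0] * m for _ in range(m)]
--     for i in range(m):
--         for j in range(m):
--             acc = 0
--             for k in range(m):
--                 acc += base[i][k] * base[k][j]
--                 if mod:
--                     acc %= mod
--             out[i][j] = acc
--     return out
--
--
-- def advanced_state_transitions_matrix(transition_matrix, initial_state, steps, mod=None):
--     # Fold the state vector into the binary exponentiation: never builds M**steps.
--     n = len(initial_state)
--     res = [x % mod for x in initial_state] if mod else list(initial_state)
--     base = transition_matrix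
--     s = steps
--     while s > 0:
--         if s % 2 == 1:
--             res = _mat_vec(base, res, n, mod)
--         s //= 2
--         if s > 0:
--             base = _mat_sq(base, mod)
--     return res
-- ===== Notes on version B (the rewrite author's own statement) =====
-- stated objective: alternative
-- what changed: B folds the state vector into the binary exponentiation (res = base*res on set bits, base squared between bits) instead of materializing the full power matrix M^steps and then applying it to the vector, saving the O(s^3) result-matrix accumulation multiplies.
-- outside the precondition, e.g. on advanced_state_transitions_matrix([[1, 1], [1, 1]], [1], 3, None): A returns [4], B returns [2]
import Mathlib
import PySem

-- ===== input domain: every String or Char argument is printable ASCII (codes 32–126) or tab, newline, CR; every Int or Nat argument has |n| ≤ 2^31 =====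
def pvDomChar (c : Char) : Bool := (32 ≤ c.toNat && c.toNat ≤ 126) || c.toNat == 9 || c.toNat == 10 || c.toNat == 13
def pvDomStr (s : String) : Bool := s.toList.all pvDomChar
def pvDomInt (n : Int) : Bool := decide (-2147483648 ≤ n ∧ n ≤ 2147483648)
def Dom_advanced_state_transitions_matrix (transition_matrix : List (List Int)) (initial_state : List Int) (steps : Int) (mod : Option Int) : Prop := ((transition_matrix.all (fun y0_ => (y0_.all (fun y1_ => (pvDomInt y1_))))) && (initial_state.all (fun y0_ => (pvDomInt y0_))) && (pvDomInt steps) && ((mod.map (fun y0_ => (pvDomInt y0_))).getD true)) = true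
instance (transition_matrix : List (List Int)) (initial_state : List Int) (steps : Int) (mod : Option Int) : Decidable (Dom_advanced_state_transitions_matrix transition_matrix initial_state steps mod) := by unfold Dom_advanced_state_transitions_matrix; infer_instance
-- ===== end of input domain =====

-- B folds the state vector into the binary exponentiation (matrix–vector products on set
-- bits, squaring between bits) instead of materializing the full power matrix M^steps and
-- then applying it; same return value on Pre_ (objective: alternative decomposition).


-- ===== PORT A =====

-- `x %= mod` guarded by Python's `if mod:` (None and 0 are falsy).  Shared rendering of the
-- two-line pattern both Pythons contain verbatim.
def pyRed (mod : Option Int) (x : Int) : Int :=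
  match mod with
  | none => x
  | some m => if m = 0 then x else PySem.Int.mod x m

-- matrix_multiply (the ValueError dimension check is not modeled; Pre_ admits only inputs on
-- which it never fires).  rows_A = len(A), cols_A = len(A[0]), cols_B = len(B[0]).
def pyMatMul (A B : List (List Int)) (mod : Option Int) : List (List Int) :=
  (List.range A.length).map (fun i =>
    (List.range ((B.headD []).length)).map (fun j =>
      (List.range ((A.headD []).length)).foldl
        (fun acc k => pyRed mod (acc + (A.getD i []).getD k 0 * (B.getD k []).getD j 0)) 0))

-- the identity matrix matrix_power starts from
def pyIdentity (n : Nat) : List (List Int) :=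
  (List.range n).map (fun i => (List.range n).map (fun j => if j = i then 1 else 0))

-- the `while power > 0` loop of matrix_power
def pyPowLoop (result base : List (List Int)) (power : Int) (mod : Option Int) : List (List Int) :=
  if _h : 0 < power then
    pyPowLoop (if PySem.Int.mod power 2 = 1 then pyMatMul result base mod else result)
      (pyMatMul base base mod) (PySem.Int.floordiv power 2) mod
  else result
termination_by power.toNat
decreasing_by
  rw [PySem.Int.floordiv_eq_ediv_of_pos (by omega : (0:Int) < 2)]
  omega

def advanced_state_transitions_matrix (transition_matrix : List (List Int)) (initial_state : List Int) (steps : Int) (mod : Option Int) : List Int :=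
  let result_matrix := pyPowLoop (pyIdentity transition_matrix.length) transition_matrix steps mod
  (List.range initial_state.length).map (fun i =>
    (List.range initial_state.length).foldl
      (fun acc j => pyRed mod (acc + (result_matrix.getD i []).getD j 0 * initial_state.getD j 0)) 0)

-- ===== PORT B =====

-- _mat_vec: one matrix-vector product with the running-mod pattern
def altMatVec (base : List (List Int)) (vec : List Int) (n : Nat) (mod : Option Int) : List Int :=
  (List.range n).map (fun i =>
    (List.range n).foldl
      (fun acc j => pyRed mod (acc + (base.getD i []).getD j 0 * vec.getD j 0)) 0)

-- _mat_sq: square an s×s matrix with the running-mod pattern (all ranges over len(base))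
def altMatSq (base : List (List Int)) (mod : Option Int) : List (List Int) :=
  (List.range base.length).map (fun i =>
    (List.range base.length).map (fun j =>
      (List.range base.length).foldl
        (fun acc k => pyRed mod (acc + (base.getD i []).getD k 0 * (base.getD k []).getD j 0)) 0))

-- the `while s > 0` loop of B: apply base on set bits, square base between bits
def altLoop (base : List (List Int)) (res : List Int) (n : Nat) (s : Int) (mod : Option Int) : List Int :=
  if _h : 0 < s then
    let res' := if PySem.Int.mod s 2 = 1 then altMatVec base res n mod else res
    let s' := PySem.Int.floordiv s 2
    altLoop (if 0 < s' then altMatSq base mod else base) res' n s' mod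
  else res
termination_by s.toNat
decreasing_by
  rw [PySem.Int.floordiv_eq_ediv_of_pos (by omega : (0:Int) < 2)]
  omega

def advanced_state_transitions_matrix_alt (transition_matrix : List (List Int)) (initial_state : List Int) (steps : Int) (mod : Option Int) : List Int :=
  -- `[x % mod for x in initial_state] if mod else list(initial_state)`, element-wise
  altLoop transition_matrix (initial_state.map (pyRed mod)) initial_state.length steps mod

-- ===== PRECONDITION & SPEC =====

-- For steps > 0, Pre_ excludes state vectors shorter than the (otherwise well-formed) matrix:
-- on that dimension mismatch A silently applies the full power matrix truncated to the
-- vector's length while B iterates truncated products — an unspecified corner with two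
-- defensible answers; everything else excluded here makes Python A raise (IndexError on an
-- empty/too-short matrix row or an over-long state vector, ValueError on a first row whose
-- length differs from the matrix dimension).
def Pre_advanced_state_transitions_matrix (transition_matrix : List (List Int)) (initial_state : List Int) (steps : Int) (mod : Option Int) : Prop :=
  (0 < steps →
    transition_matrix ≠ [] ∧
    (transition_matrix.headD []).length = transition_matrix.length ∧
    (∀ r ∈ transition_matrix, transition_matrix.length ≤ r.length) ∧
    initial_state.length = transition_matrix.length) ∧
  (steps ≤ 0 → initial_state.length ≤ transition_matrix.length)

instance (transition_matrix : List (List Int)) (initial_state : List Int) (steps : Int) (mod : Option Int) : Decidable (Pre_advanced_state_transitions_matrix transition_matrix initial_state steps mod) := by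
  unfold Pre_advanced_state_transitions_matrix; infer_instance

def pvWitness_advanced_state_transitions_matrix : List (List Int) × List Int × Int × Option Int :=
  ([[1, 1], [1, 0]], [1, 0], 10, some 5)

def Spec_advanced_state_transitions_matrix (transition_matrix : List (List Int)) (initial_state : List Int) (steps : Int) (mod : Option Int) (out : List Int) : Prop := out = advanced_state_transitions_matrix_alt transition_matrix initial_state steps mod
instance (transition_matrix : List (List Int)) (initial_state : List Int) (steps : Int) (mod : Option Int) (out : List Int) : Decidable (Spec_advanced_state_transitions_matrix transition_matrix initial_state steps mod out) := by unfold Spec_advanced_state_transitions_matrix; infer_instance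

-- ===== CLAIM (what is proved, stated in full; the proofs are below) =====
def Claim_equal_advanced_state_transitions_matrix : Prop := ∀ (transition_matrix : List (List Int)) (initial_state : List Int) (steps : Int) (mod : Option Int), Dom_advanced_state_transitions_matrix transition_matrix initial_state steps mod → Pre_advanced_state_transitions_matrix transition_matrix initial_state steps mod → Spec_advanced_state_transitions_matrix transition_matrix initial_state steps mod (advanced_state_transitions_matrix transition_matrix initial_state steps mod)

-- ===== LEMMAS AND PROOFS =====

-- ---- scalar layer: pyRed is "reduce modulo m" and respects congruence ----

theorem pyRed_zero (mod : Option Int) : pyRed mod 0 = 0 := by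
  cases mod with
  | none => rfl
  | some m =>
    by_cases h : m = 0 <;> simp [pyRed, h, PySem.Int.mod, Int.zero_fmod]

theorem pyRed_add_left (mod : Option Int) (a b : Int) :
    pyRed mod (pyRed mod a + b) = pyRed mod (a + b) := by
  cases mod with
  | none => rfl
  | some m =>
    by_cases h : m = 0
    · simp [pyRed, h]
    · simp only [pyRed, h, if_neg, ite_false, PySem.Int.mod]
      have hx : Int.fmod a m + b = (a + b) + m * (-(a.fdiv m)) := by
        rw [Int.fmod_def]; ring
      rw [hx, Int.add_mul_fmod_self_left]

theorem pyRed_idem (mod : Option Int) (a : Int) :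
    pyRed mod (pyRed mod a) = pyRed mod a := by
  have h := pyRed_add_left mod a 0
  simpa using h

theorem pyRed_mul_left (mod : Option Int) (a b : Int) :
    pyRed mod (pyRed mod a * b) = pyRed mod (a * b) := by
  cases mod with
  | none => rfl
  | some m =>
    by_cases h : m = 0
    · simp [pyRed, h]
    · simp only [pyRed, h, ite_false, PySem.Int.mod]
      have hx : Int.fmod a m * b = a * b + m * (-(a.fdiv m) * b) := by
        rw [Int.fmod_def]; ring
      rw [hx, Int.add_mul_fmod_self_left]

theorem pyRed_congr_add (mod : Option Int) {a a' b b' : Int}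
    (h1 : pyRed mod a = pyRed mod a') (h2 : pyRed mod b = pyRed mod b') :
    pyRed mod (a + b) = pyRed mod (a' + b') := by
  calc pyRed mod (a + b) = pyRed mod (pyRed mod a + b) := (pyRed_add_left mod a b).symm
    _ = pyRed mod (pyRed mod a' + b) := by rw [h1]
    _ = pyRed mod (a' + b) := pyRed_add_left mod a' b
    _ = pyRed mod (b + a') := by rw [add_comm]
    _ = pyRed mod (pyRed mod b + a') := (pyRed_add_left mod b a').symm
    _ = pyRed mod (pyRed mod b' + a') := by rw [h2]
    _ = pyRed mod (b' + a') := pyRed_add_left mod b' a'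
    _ = pyRed mod (a' + b') := by rw [add_comm]

theorem pyRed_congr_mul (mod : Option Int) {a a' b b' : Int}
    (h1 : pyRed mod a = pyRed mod a') (h2 : pyRed mod b = pyRed mod b') :
    pyRed mod (a * b) = pyRed mod (a' * b') := by
  calc pyRed mod (a * b) = pyRed mod (pyRed mod a * b) := (pyRed_mul_left mod a b).symm
    _ = pyRed mod (pyRed mod a' * b) := by rw [h1]
    _ = pyRed mod (a' * b) := pyRed_mul_left mod a' b
    _ = pyRed mod (b * a') := by rw [mul_comm]
    _ = pyRed mod (pyRed mod b * a') := (pyRed_mul_left mod b a').symm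
    _ = pyRed mod (pyRed mod b' * a') := by rw [h2]
    _ = pyRed mod (b' * a') := pyRed_mul_left mod b' a'
    _ = pyRed mod (a' * b') := by rw [mul_comm]

theorem pyRed_congr_sum (mod : Option Int) {ι : Type} (s : Finset ι) (f g : ι → Int)
    (h : ∀ i ∈ s, pyRed mod (f i) = pyRed mod (g i)) :
    pyRed mod (∑ i ∈ s, f i) = pyRed mod (∑ i ∈ s, g i) := by
  induction s using Finset.cons_induction with
  | empty => simp
  | cons a s ha ih =>
    rw [Finset.sum_cons, Finset.sum_cons]
    exact pyRed_congr_add mod (h a (Finset.mem_cons_self a s))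
      (ih (fun i hi => h i (Finset.mem_cons_of_mem hi)))

-- the running-mod accumulation loop computes pyRed of the plain sum
theorem sumRed_eq (mod : Option Int) (f : Nat → Int) (n : Nat) :
    (List.range n).foldl (fun acc k => pyRed mod (acc + f k)) 0
      = pyRed mod (∑ k ∈ Finset.range n, f k) := by
  induction n with
  | zero => simp [pyRed_zero]
  | succ n ih =>
    rw [List.range_succ, List.foldl_append, Finset.sum_range_succ]
    simp only [List.foldl_cons, List.foldl_nil, ih]
    exact pyRed_add_left mod _ _

-- ---- matrix layer ----

def toMat (n : Nat) (X : List (List Int)) : Matrix (Fin n) (Fin n) Int :=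
  Matrix.of fun i j => (X.getD i.1 []).getD j.1 0

def toVec (n : Nat) (v : List Int) : Fin n → Int := fun i => v.getD i.1 0

def listOfMat (n : Nat) (mod : Option Int) (M : Matrix (Fin n) (Fin n) Int) : List (List Int) :=
  List.ofFn fun i : Fin n => List.ofFn fun j : Fin n => pyRed mod (M i j)

def listOfVec (n : Nat) (mod : Option Int) (w : Fin n → Int) : List Int :=
  List.ofFn fun i : Fin n => pyRed mod (w i)

def MEq (mod : Option Int) {n : Nat} (X Y : Matrix (Fin n) (Fin n) Int) : Prop :=
  ∀ i j, pyRed mod (X i j) = pyRed mod (Y i j)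

def VEq (mod : Option Int) {n : Nat} (x y : Fin n → Int) : Prop :=
  ∀ i, pyRed mod (x i) = pyRed mod (y i)

theorem MEq_refl (mod : Option Int) {n : Nat} (X : Matrix (Fin n) (Fin n) Int) : MEq mod X X :=
  fun _ _ => rfl

theorem MEq_trans (mod : Option Int) {n : Nat} {X Y Z : Matrix (Fin n) (Fin n) Int}
    (h1 : MEq mod X Y) (h2 : MEq mod Y Z) : MEq mod X Z :=
  fun i j => (h1 i j).trans (h2 i j)

theorem MEq_mul (mod : Option Int) {n : Nat} {X X' Y Y' : Matrix (Fin n) (Fin n) Int}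
    (h1 : MEq mod X X') (h2 : MEq mod Y Y') : MEq mod (X * Y) (X' * Y') := by
  intro i j
  rw [Matrix.mul_apply, Matrix.mul_apply]
  exact pyRed_congr_sum mod Finset.univ _ _
    (fun k _ => pyRed_congr_mul mod (h1 i k) (h2 k j))

theorem VEq_mulVec (mod : Option Int) {n : Nat} {X X' : Matrix (Fin n) (Fin n) Int}
    {x x' : Fin n → Int} (h1 : MEq mod X X') (h2 : VEq mod x x') :
    VEq mod (X.mulVec x) (X'.mulVec x') := by
  intro i
  simp only [Matrix.mulVec, dotProduct]
  exact pyRed_congr_sum mod Finset.univ _ _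
    (fun k _ => pyRed_congr_mul mod (h1 i k) (h2 k))

theorem length_listOfMat (n : Nat) (mod : Option Int) (M : Matrix (Fin n) (Fin n) Int) :
    (listOfMat n mod M).length = n := by simp [listOfMat]

theorem head_listOfMat (n : Nat) (mod : Option Int) (M : Matrix (Fin n) (Fin n) Int) :
    ((listOfMat n mod M).headD []).length = n := by
  cases n with
  | zero => simp [listOfMat]
  | succ n => rw [listOfMat, List.ofFn_succ]; simp

theorem getD_listOfMat (n : Nat) (mod : Option Int) (M : Matrix (Fin n) (Fin n) Int)
    (i j : Fin n) : (((listOfMat n mod M).getD i.1 []).getD j.1 0) = pyRed mod (M i j) := by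
  simp [listOfMat, List.getD_eq_getElem?_getD, List.getElem?_ofFn, i.isLt, j.isLt]

theorem toMat_listOfMat (n : Nat) (mod : Option Int) (M : Matrix (Fin n) (Fin n) Int) :
    MEq mod (toMat n (listOfMat n mod M)) M := by
  intro i j
  rw [toMat, Matrix.of_apply, getD_listOfMat]
  exact pyRed_idem mod _

theorem getD_listOfVec (n : Nat) (mod : Option Int) (w : Fin n → Int) (i : Fin n) :
    (listOfVec n mod w).getD i.1 0 = pyRed mod (w i) := by
  rw [listOfVec, List.getD_eq_getElem?_getD, List.getElem?_ofFn]
  simp [i.isLt]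

theorem toVec_listOfVec (n : Nat) (mod : Option Int) (w : Fin n → Int) :
    VEq mod (toVec n (listOfVec n mod w)) w := by
  intro i
  rw [toVec, getD_listOfVec]
  exact pyRed_idem mod _

theorem listOfVec_congr (n : Nat) (mod : Option Int) {w w' : Fin n → Int}
    (h : VEq mod w w') : listOfVec n mod w = listOfVec n mod w' := by
  unfold listOfVec
  congr 1
  funext i
  exact h i

-- both Pythons' inner matrix-vector loop computes listOfVec of a mulVec
theorem matvec_eq (n : Nat) (mod : Option Int) (X : List (List Int)) (v : List Int) :
    ((List.range n).map (fun i =>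
      (List.range n).foldl
        (fun acc j => pyRed mod (acc + (X.getD i []).getD j 0 * v.getD j 0)) 0))
    = listOfVec n mod ((toMat n X).mulVec (toVec n v)) := by
  apply List.ext_getElem
  · simp [listOfVec]
  · intro i h1 h2
    simp only [List.length_map, List.length_range] at h1
    simp only [List.getElem_map, List.getElem_range]
    rw [sumRed_eq]
    simp only [listOfVec]
    rw [List.getElem_ofFn]
    congr 1
    simp only [Matrix.mulVec, dotProduct, toMat, toVec, Matrix.of_apply]
    exact (Fin.sum_univ_eq_sum_range (fun k => (X.getD i []).getD k 0 * v.getD k 0) n).symm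

-- pyMatMul is listOfMat of the mathematical product
theorem pyMatMul_eq (n : Nat) (mod : Option Int) (X Y : List (List Int))
    (hX : X.length = n) (hXh : (X.headD []).length = n) (hYh : (Y.headD []).length = n) :
    pyMatMul X Y mod = listOfMat n mod (toMat n X * toMat n Y) := by
  unfold pyMatMul
  rw [hX, hXh, hYh]
  apply List.ext_getElem
  · simp [listOfMat]
  · intro i h1 h2
    simp only [List.length_map, List.length_range] at h1
    simp only [List.getElem_map, List.getElem_range, listOfMat]
    rw [List.getElem_ofFn]
    apply List.ext_getElem
    · simp
    · intro j g1 g2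
      simp only [List.length_map, List.length_range] at g1
      simp only [List.getElem_map, List.getElem_range]
      rw [List.getElem_ofFn, sumRed_eq]
      congr 1
      simp only [Matrix.mul_apply, toMat, Matrix.of_apply]
      exact (Fin.sum_univ_eq_sum_range
        (fun k => (X.getD i []).getD k 0 * (Y.getD k []).getD j 0) n).symm

-- altMatSq is listOfMat of the mathematical square
theorem altMatSq_eq (n : Nat) (mod : Option Int) (X : List (List Int)) (hX : X.length = n) :
    altMatSq X mod = listOfMat n mod (toMat n X * toMat n X) := by
  unfold altMatSq
  rw [hX]
  apply List.ext_getElem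
  · simp [listOfMat]
  · intro i h1 h2
    simp only [List.length_map, List.length_range] at h1
    simp only [List.getElem_map, List.getElem_range, listOfMat]
    rw [List.getElem_ofFn]
    apply List.ext_getElem
    · simp
    · intro j g1 g2
      simp only [List.length_map, List.length_range] at g1
      simp only [List.getElem_map, List.getElem_range]
      rw [List.getElem_ofFn, sumRed_eq]
      congr 1
      simp only [Matrix.mul_apply, toMat, Matrix.of_apply]
      exact (Fin.sum_univ_eq_sum_range
        (fun k => (X.getD i []).getD k 0 * (X.getD k []).getD j 0) n).symm

theorem altMatVec_eq (n : Nat) (mod : Option Int) (X : List (List Int)) (v : List Int) :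
    altMatVec X v n mod = listOfVec n mod ((toMat n X).mulVec (toVec n v)) :=
  matvec_eq n mod X v

theorem pyIdentity_getD (n i j : Nat) (hi : i < n) (hj : j < n) :
    ((pyIdentity n).getD i []).getD j 0 = if j = i then (1 : Int) else 0 := by
  simp [pyIdentity, List.getD_eq_getElem?_getD, hi, hj]

theorem pyIdentity_toMat (n : Nat) : toMat n (pyIdentity n) = 1 := by
  apply Matrix.ext
  intro i j
  rw [toMat, Matrix.of_apply, pyIdentity_getD n i.1 j.1 i.isLt j.isLt, Matrix.one_apply]
  by_cases h : i = j
  · simp [h]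
  · have h2 : (j : Nat) ≠ (i : Nat) := fun hh => h (Fin.ext hh.symm)
    simp [h, h2]

theorem pyIdentity_length (n : Nat) : (pyIdentity n).length = n := by
  simp [pyIdentity]

theorem pyIdentity_head (n : Nat) : ((pyIdentity n).headD []).length = n := by
  cases n with
  | zero => simp [pyIdentity]
  | succ n => rw [pyIdentity, List.range_succ_eq_map]; simp

-- unfolding equations for the two loops
theorem pyPowLoop_pos (R B : List (List Int)) (power : Int) (mod : Option Int) (h : 0 < power) :
    pyPowLoop R B power mod
      = pyPowLoop (if PySem.Int.mod power 2 = 1 then pyMatMul R B mod else R)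
          (pyMatMul B B mod) (PySem.Int.floordiv power 2) mod := by
  rw [pyPowLoop]; simp [h]

theorem pyPowLoop_nonpos (R B : List (List Int)) (power : Int) (mod : Option Int) (h : ¬ 0 < power) :
    pyPowLoop R B power mod = R := by
  rw [pyPowLoop]; simp [h]

theorem altLoop_pos (base : List (List Int)) (res : List Int) (n : Nat) (s : Int)
    (mod : Option Int) (h : 0 < s) :
    altLoop base res n s mod
      = altLoop (if 0 < PySem.Int.floordiv s 2 then altMatSq base mod else base)
          (if PySem.Int.mod s 2 = 1 then altMatVec base res n mod else res)
          n (PySem.Int.floordiv s 2) mod := by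
  rw [altLoop]; simp [h]

theorem altLoop_nonpos (base : List (List Int)) (res : List Int) (n : Nat) (s : Int)
    (mod : Option Int) (h : ¬ 0 < s) : altLoop base res n s mod = res := by
  rw [altLoop]; simp [h]

-- monoid power bookkeeping for the binary decomposition
theorem pow_step {M : Type} [Monoid M] (Q : M) (k b : Nat) :
    (Q * Q) ^ k * Q ^ b = Q ^ (2 * k + b) := by
  rw [← pow_two, ← pow_mul, ← pow_add]

theorem pow_step' {M : Type} [Monoid M] (P Q : M) (k b : Nat) :
    (P * Q ^ b) * (Q * Q) ^ k = P * Q ^ (2 * k + b) := by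
  rw [mul_assoc, ← pow_two, ← pow_mul, ← pow_add, Nat.add_comm b (2 * k)]

-- loop invariant for A's matrix_power loop
theorem pyPowLoop_spec (n : Nat) (mod : Option Int) :
    ∀ (t : Nat) (s : Int), s.toNat ≤ t →
    ∀ (Rl Bl : List (List Int)) (P Q : Matrix (Fin n) (Fin n) Int),
      Rl.length = n → ((Rl.headD []).length = n) →
      Bl.length = n → ((Bl.headD []).length = n) →
      MEq mod (toMat n Rl) P → MEq mod (toMat n Bl) Q →
      (pyPowLoop Rl Bl s mod).length = n ∧
      (((pyPowLoop Rl Bl s mod).headD []).length = n) ∧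
      MEq mod (toMat n (pyPowLoop Rl Bl s mod)) (P * Q ^ s.toNat) := by
  intro t
  induction t with
  | zero =>
    intro s hs Rl Bl P Q hRl hRh hBl hBh hR hB
    have hsn : ¬ 0 < s := by omega
    rw [pyPowLoop_nonpos _ _ _ _ hsn]
    have h0 : s.toNat = 0 := by omega
    rw [h0, pow_zero, mul_one]
    exact ⟨hRl, hRh, hR⟩
  | succ t ih =>
    intro s hs Rl Bl P Q hRl hRh hBl hBh hR hB
    by_cases hpos : 0 < s
    · rw [pyPowLoop_pos _ _ _ _ hpos]
      have hdiv : PySem.Int.floordiv s 2 = s / 2 := PySem.Int.floordiv_eq_ediv_of_pos (by omega)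
      have hmod : PySem.Int.mod s 2 = s % 2 := PySem.Int.mod_eq_emod_of_pos (by omega)
      have hle : (PySem.Int.floordiv s 2).toNat ≤ t := by rw [hdiv]; omega
      have hBB := pyMatMul_eq n mod Bl Bl hBl hBh hBh
      have hBB_len : (pyMatMul Bl Bl mod).length = n := by
        rw [hBB]; exact length_listOfMat n mod _
      have hBB_head : ((pyMatMul Bl Bl mod).headD []).length = n := by
        rw [hBB]; exact head_listOfMat n mod _
      have hBBm : MEq mod (toMat n (pyMatMul Bl Bl mod)) (Q * Q) := by
        rw [hBB]; exact MEq_trans mod (toMat_listOfMat n mod _) (MEq_mul mod hB hB)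
      by_cases hbit : PySem.Int.mod s 2 = 1
      · rw [if_pos hbit]
        rw [hmod] at hbit
        have hRB := pyMatMul_eq n mod Rl Bl hRl hRh hBh
        have hRB_len : (pyMatMul Rl Bl mod).length = n := by
          rw [hRB]; exact length_listOfMat n mod _
        have hRB_head : ((pyMatMul Rl Bl mod).headD []).length = n := by
          rw [hRB]; exact head_listOfMat n mod _
        have hRBm : MEq mod (toMat n (pyMatMul Rl Bl mod)) (P * Q) := by
          rw [hRB]; exact MEq_trans mod (toMat_listOfMat n mod _) (MEq_mul mod hR hB)
        obtain ⟨c1, c2, c3⟩ := ih (PySem.Int.floordiv s 2) hle (pyMatMul Rl Bl mod)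
          (pyMatMul Bl Bl mod) (P * Q) (Q * Q) hRB_len hRB_head hBB_len hBB_head hRBm hBBm
        refine ⟨c1, c2, ?_⟩
        have harith : s.toNat = 2 * (PySem.Int.floordiv s 2).toNat + 1 := by
          rw [hdiv]; omega
        have heq : (P * Q) * (Q * Q) ^ (PySem.Int.floordiv s 2).toNat = P * Q ^ s.toNat := by
          have hp := pow_step' P Q (PySem.Int.floordiv s 2).toNat 1
          rw [pow_one] at hp
          rw [hp, harith]
        rw [heq] at c3
        exact c3
      · rw [if_neg hbit]
        rw [hmod] at hbit
        obtain ⟨c1, c2, c3⟩ := ih (PySem.Int.floordiv s 2) hle Rl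
          (pyMatMul Bl Bl mod) P (Q * Q) hRl hRh hBB_len hBB_head hR hBBm
        refine ⟨c1, c2, ?_⟩
        have harith : s.toNat = 2 * (PySem.Int.floordiv s 2).toNat := by
          rw [hdiv]; omega
        have heq : P * (Q * Q) ^ (PySem.Int.floordiv s 2).toNat = P * Q ^ s.toNat := by
          have hp := pow_step' P Q (PySem.Int.floordiv s 2).toNat 0
          rw [pow_zero, mul_one, Nat.add_zero] at hp
          rw [hp, harith]
        rw [heq] at c3
        exact c3
    · rw [pyPowLoop_nonpos _ _ _ _ hpos]
      have h0 : s.toNat = 0 := by omega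
      rw [h0, pow_zero, mul_one]
      exact ⟨hRl, hRh, hR⟩

-- loop invariant for B's folded loop
theorem altLoop_spec (n : Nat) (mod : Option Int) :
    ∀ (t : Nat) (s : Int), s.toNat ≤ t →
    ∀ (Bl : List (List Int)) (w : Fin n → Int) (Q : Matrix (Fin n) (Fin n) Int),
      Bl.length = n → MEq mod (toMat n Bl) Q →
      altLoop Bl (listOfVec n mod w) n s mod = listOfVec n mod ((Q ^ s.toNat).mulVec w) := by
  intro t
  induction t with
  | zero =>
    intro s hs Bl w Q hBl hB
    have hsn : ¬ 0 < s := by omega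
    rw [altLoop_nonpos _ _ _ _ _ hsn]
    have h0 : s.toNat = 0 := by omega
    rw [h0, pow_zero, Matrix.one_mulVec]
  | succ t ih =>
    intro s hs Bl w Q hBl hB
    by_cases hpos : 0 < s
    · rw [altLoop_pos _ _ _ _ _ hpos]
      have hdiv : PySem.Int.floordiv s 2 = s / 2 := PySem.Int.floordiv_eq_ediv_of_pos (by omega)
      have hmod : PySem.Int.mod s 2 = s % 2 := PySem.Int.mod_eq_emod_of_pos (by omega)
      have hres1 : altMatVec Bl (listOfVec n mod w) n mod = listOfVec n mod (Q.mulVec w) := by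
        rw [altMatVec_eq]
        exact listOfVec_congr n mod (VEq_mulVec mod hB (toVec_listOfVec n mod w))
      by_cases hsp : 0 < PySem.Int.floordiv s 2
      · rw [if_pos hsp]
        have hsq := altMatSq_eq n mod Bl hBl
        have hlen : (altMatSq Bl mod).length = n := by
          rw [hsq]; exact length_listOfMat n mod _
        have hm : MEq mod (toMat n (altMatSq Bl mod)) (Q * Q) := by
          rw [hsq]; exact MEq_trans mod (toMat_listOfMat n mod _) (MEq_mul mod hB hB)
        have hle : (PySem.Int.floordiv s 2).toNat ≤ t := by rw [hdiv]; omega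
        by_cases hbit : PySem.Int.mod s 2 = 1
        · rw [if_pos hbit, hres1]
          rw [hmod] at hbit
          rw [ih (PySem.Int.floordiv s 2) hle (altMatSq Bl mod) (Q.mulVec w) (Q * Q) hlen hm]
          congr 1
          have harith : s.toNat = 2 * (PySem.Int.floordiv s 2).toNat + 1 := by
            rw [hdiv]; omega
          have heq : (Q * Q) ^ (PySem.Int.floordiv s 2).toNat * Q = Q ^ s.toNat := by
            have hp := pow_step Q (PySem.Int.floordiv s 2).toNat 1
            rw [pow_one] at hp
            rw [hp, harith]
          rw [Matrix.mulVec_mulVec, heq]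
        · rw [if_neg hbit]
          rw [hmod] at hbit
          rw [ih (PySem.Int.floordiv s 2) hle (altMatSq Bl mod) w (Q * Q) hlen hm]
          congr 2
          have harith : s.toNat = 2 * (PySem.Int.floordiv s 2).toNat := by
            rw [hdiv]; omega
          have hp := pow_step Q (PySem.Int.floordiv s 2).toNat 0
          rw [pow_zero, mul_one, Nat.add_zero] at hp
          rw [hp, harith]
      · rw [if_neg hsp]
        have hs1 : s = 1 := by rw [hdiv] at hsp; omega
        have hbit : PySem.Int.mod s 2 = 1 := by rw [hmod, hs1]; decide
        rw [if_pos hbit, hres1, altLoop_nonpos _ _ _ _ _ hsp]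
        congr 1
        rw [hs1]
        rw [show ((1 : Int).toNat) = 1 from rfl, pow_one]
    · rw [altLoop_nonpos _ _ _ _ _ hpos]
      have h0 : s.toNat = 0 := by omega
      rw [h0, pow_zero, Matrix.one_mulVec]

theorem map_red_eq_listOfVec (mod : Option Int) (v : List Int) :
    v.map (pyRed mod) = listOfVec v.length mod (toVec v.length v) := by
  apply List.ext_getElem
  · simp [listOfVec]
  · intro i h1 h2
    simp only [List.length_map] at h1
    rw [List.getElem_map]
    simp only [listOfVec]
    rw [List.getElem_ofFn]
    congr 1
    rw [toVec, List.getD_eq_getElem v 0 h1]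

-- ===== VERDICT (by name: the statement is the Claim_ definition above) =====
theorem advanced_state_transitions_matrix_spec : Claim_equal_advanced_state_transitions_matrix := by
  intro tm v steps mod _dom hpre
  unfold Spec_advanced_state_transitions_matrix
  by_cases hs : 0 < steps
  · obtain ⟨hne, hhead, hrows, hv⟩ := hpre.1 hs
    have hlen_tm : tm.length = v.length := hv.symm
    have hA : advanced_state_transitions_matrix tm v steps mod
        = listOfVec v.length mod
            ((toMat v.length (pyPowLoop (pyIdentity tm.length) tm steps mod)).mulVec
              (toVec v.length v)) := by
      unfold advanced_state_transitions_matrix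
      exact matvec_eq v.length mod _ v
    have hB : advanced_state_transitions_matrix_alt tm v steps mod
        = altLoop tm (listOfVec v.length mod (toVec v.length v)) v.length steps mod := by
      unfold advanced_state_transitions_matrix_alt
      rw [map_red_eq_listOfVec]
    rw [hA, hB]
    rw [altLoop_spec v.length mod steps.toNat steps le_rfl tm (toVec v.length v)
      (toMat v.length tm) hlen_tm (MEq_refl mod _)]
    have hid_len : (pyIdentity tm.length).length = v.length := by
      rw [pyIdentity_length, hlen_tm]
    have hid_head : ((pyIdentity tm.length).headD []).length = v.length := by
      rw [pyIdentity_head, hlen_tm]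
    have hid_m : MEq mod (toMat v.length (pyIdentity tm.length)) 1 := by
      rw [hlen_tm, pyIdentity_toMat]
      exact MEq_refl mod _
    have hhead' : (tm.headD []).length = v.length := by rw [hhead, hlen_tm]
    obtain ⟨_, _, hPm⟩ := pyPowLoop_spec v.length mod steps.toNat steps le_rfl
      (pyIdentity tm.length) tm 1 (toMat v.length tm) hid_len hid_head hlen_tm hhead'
      hid_m (MEq_refl mod _)
    rw [one_mul] at hPm
    exact listOfVec_congr v.length mod (VEq_mulVec mod hPm (fun _ => rfl))
  · have hle := hpre.2 (by omega)
    unfold advanced_state_transitions_matrix advanced_state_transitions_matrix_alt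
    rw [altLoop_nonpos _ _ _ _ _ hs, pyPowLoop_nonpos _ _ _ _ hs]
    apply List.ext_getElem
    · simp
    · intro i h1 h2
      simp only [List.length_map, List.length_range] at h1
      simp only [List.getElem_map, List.getElem_range]
      rw [sumRed_eq]
      have hcong : (∑ j ∈ Finset.range v.length,
            ((pyIdentity tm.length).getD i []).getD j 0 * v.getD j 0)
          = ∑ j ∈ Finset.range v.length, (if j = i then v.getD j 0 else 0) := by
        apply Finset.sum_congr rfl
        intro j hj
        have hj' := Finset.mem_range.mp hj
        rw [pyIdentity_getD tm.length i j (by omega) (by omega)]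
        by_cases h : j = i <;> simp [h]
      rw [hcong, Finset.sum_ite_eq' (Finset.range v.length) i (fun j => v.getD j 0)]
      rw [if_pos (Finset.mem_range.mpr h1)]
      rw [List.getD_eq_getElem v 0 h1]
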